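-- pv_equiv track=rewrite | github.com/kattaNagasainikhila-wq/health_data | app.py | find_disease_key
-- ===== SOURCE A (Python) =====
-- def find_disease_key(user_input, diseases_data):
--     """Return the disease key matching user input or synonym."""
--     user_input_lower = user_input.lower()
--     for disease, info in diseases_data.items():
--         if disease.lower() == user_input_lower:
--             return disease
--         for syn in info.get("synonyms", []):
--             if syn.lower() == user_input_lower:
--                 return disease
--     return None
-- ===== SOURCE B (Python) =====
-- def find_disease_key(user_input, diseases_data):
--     """Return the disease key matching user input or synonym."""
--     index = {}
--     for disease, info in diseases_data.items():
--         index.setdefault(disease.lower(), disease)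
--         for syn in info.get("synonyms", []):
--             index.setdefault(syn.lower(), disease)
--     return index.get(user_input.lower())
-- ===== Notes on version B (the rewrite author's own statement) =====
-- stated objective: idiomatic
-- what changed: Replaces the early-return nested scan with a build-then-lookup pass: a dict index from lowercased names/synonyms to disease keys (setdefault preserves first-match-wins), then a single dict lookup.
import Mathlib
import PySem

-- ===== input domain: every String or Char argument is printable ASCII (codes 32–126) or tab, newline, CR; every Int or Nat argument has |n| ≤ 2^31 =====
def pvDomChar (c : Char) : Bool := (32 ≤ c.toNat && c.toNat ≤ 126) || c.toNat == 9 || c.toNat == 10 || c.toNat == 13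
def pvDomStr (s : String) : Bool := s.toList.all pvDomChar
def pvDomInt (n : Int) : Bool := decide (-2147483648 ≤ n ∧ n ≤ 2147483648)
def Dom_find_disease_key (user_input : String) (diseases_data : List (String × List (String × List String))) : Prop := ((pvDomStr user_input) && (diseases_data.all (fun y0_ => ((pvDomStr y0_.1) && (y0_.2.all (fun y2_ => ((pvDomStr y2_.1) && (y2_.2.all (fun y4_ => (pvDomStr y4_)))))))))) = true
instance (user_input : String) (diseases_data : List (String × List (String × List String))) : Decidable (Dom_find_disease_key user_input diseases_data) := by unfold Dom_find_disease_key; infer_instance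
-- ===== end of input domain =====

-- B builds a lowercase->key index dict once (setdefault = first wins) and does one lookup, instead of A's nested early-return scan; objective: idiomatic.


-- ===== PORT A =====
-- info.get("synonyms", []) : first-match association lookup with default
def pvGetSyn (info : List (String × List String)) : List String :=
  (PySem.Dict.mk info).getD "synonyms" []

-- inner loop: does any synonym lower to ul?
def pvSynHit (ul : String) : List String → Bool
  | [] => false
  | s :: rest => if PySem.Str.lower s = ul then true else pvSynHit ul rest

def pvALoop (ul : String) : List (String × List (String × List String)) → Option String
  | [] => none
  | (disease, info) :: rest =>
    if PySem.Str.lower disease = ul then some disease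
    else if pvSynHit ul (pvGetSyn info) then some disease
    else pvALoop ul rest

def find_disease_key (user_input : String) (diseases_data : List (String × List (String × List String))) : Option String :=
  pvALoop (PySem.Str.lower user_input) diseases_data

-- ===== PORT B =====
def pvStep (idx : PySem.Dict String String) (p : String × List (String × List String)) : PySem.Dict String String :=
  ((PySem.Dict.mk p.2).getD "synonyms" []).foldl
    (fun d syn => d.setdefault (PySem.Str.lower syn) p.1)
    (idx.setdefault (PySem.Str.lower p.1) p.1)

def find_disease_key_alt (user_input : String) (diseases_data : List (String × List (String × List String))) : Option String :=
  (diseases_data.foldl pvStep PySem.Dict.empty).get? (PySem.Str.lower user_input)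

-- ===== PRECONDITION & SPEC =====
def Spec_find_disease_key (user_input : String) (diseases_data : List (String × List (String × List String))) (out : Option String) : Prop := out = find_disease_key_alt user_input diseases_data
instance (user_input : String) (diseases_data : List (String × List (String × List String))) (out : Option String) : Decidable (Spec_find_disease_key user_input diseases_data out) := by unfold Spec_find_disease_key; infer_instance

-- ===== CLAIM (what is proved, stated in full; the proofs are below) =====
def Claim_equal_find_disease_key : Prop := ∀ (user_input : String) (diseases_data : List (String × List (String × List String))), Dom_find_disease_key user_input diseases_data → Spec_find_disease_key user_input diseases_data (find_disease_key user_input diseases_data)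

-- ===== LEMMAS AND PROOFS =====

-- lookup of setdefault at an arbitrary key
theorem pv_get?_setdefault (d : PySem.Dict String String) (k v q : String) :
    (d.setdefault k v).get? q =
      match d.get? q with
      | some w => some w
      | none => if q = k then some v else none := by
  by_cases hc : d.contains k
  · rw [PySem.Dict.setdefault_of_contains d v hc]
    cases hq : d.get? q with
    | some w => rfl
    | none =>
      by_cases hqk : q = k
      · subst hqk
        rw [PySem.Dict.contains_eq_isSome_get?] at hc
        simp [hq] at hc
      · simp [hqk]
  · rw [PySem.Dict.setdefault_of_not_contains d v (by simpa using hc)]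
    rw [PySem.Dict.get?_insert]
    cases hq : d.get? q with
    | some w =>
      by_cases hqk : q = k
      · subst hqk
        rw [PySem.Dict.contains_eq_isSome_get?] at hc
        simp [hq] at hc
      · simp [hqk]
    | none =>
      by_cases hqk : q = k <;> simp [hqk]

-- synonym fold: lookup after folding setdefaults over syns
theorem pv_syn_fold (ul dz : String) (syns : List String) (d : PySem.Dict String String) :
    (syns.foldl (fun d syn => d.setdefault (PySem.Str.lower syn) dz) d).get? ul =
      match d.get? ul with
      | some w => some w
      | none => if pvSynHit ul syns then some dz else none := by
  induction syns generalizing d with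
  | nil => cases h : d.get? ul <;> simp [h, pvSynHit]
  | cons s rest ih =>
    simp only [List.foldl_cons]
    rw [ih, pv_get?_setdefault]
    cases hd : d.get? ul with
    | some w => rfl
    | none =>
      by_cases h : PySem.Str.lower s = ul
      · simp [pvSynHit, h]
      · have : ¬ ul = PySem.Str.lower s := fun e => h e.symm
        simp [pvSynHit, h, this]

-- main fold invariant
theorem pv_fold_inv (ul : String) (dd : List (String × List (String × List String)))
    (d : PySem.Dict String String) :
    (dd.foldl pvStep d).get? ul =
      match d.get? ul with
      | some w => some w
      | none => pvALoop ul dd := by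
  induction dd generalizing d with
  | nil => cases h : d.get? ul <;> simp [h, pvALoop]
  | cons p rest ih =>
    obtain ⟨disease, info⟩ := p
    simp only [List.foldl_cons]
    rw [ih]
    show (match (pvStep d (disease, info)).get? ul with
          | some w => some w
          | none => pvALoop ul rest) = _
    rw [pvStep, pv_syn_fold, pv_get?_setdefault]
    cases hd : d.get? ul with
    | some w => rfl
    | none =>
      by_cases h1 : PySem.Str.lower disease = ul
      · have hq : ul = PySem.Str.lower disease := h1.symm
        simp only [pvALoop, pvGetSyn, if_pos hq, if_pos h1]
      · have hq : ¬ ul = PySem.Str.lower disease := fun e => h1 e.symm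
        simp only [pvALoop, pvGetSyn, if_neg hq, if_neg h1]
        by_cases h2 : pvSynHit ul ((PySem.Dict.mk info).getD "synonyms" [])
        · simp only [if_pos h2]
        · simp only [if_neg h2]

-- ===== VERDICT (by name: the statement is the Claim_ definition above) =====
theorem find_disease_key_spec : Claim_equal_find_disease_key := by
  intro user_input diseases_data _
  unfold Spec_find_disease_key find_disease_key find_disease_key_alt
  rw [pv_fold_inv]
  simp [PySem.Dict.get?_empty]
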